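-- pv_equiv track=rewrite | github.com/skshahriarahmedraka/codeforces-python | r188_C. Bad Sequence_1214C.py | check
-- ===== SOURCE A (Python) =====
-- def check(s):
--     bal=0
--     for i in range(len(s)):
--         if s[i]=='(':
--             bal+=1
--         elif s[i]==")":
--             bal-=1
--         if bal<0:
--             return False
--     for i in range(len(s)-1,-1,-1):
--         if s[i]=='(':
--             bal+=1
--         elif s[i]==")":
--             bal-=1
--         if bal>0:
--             return False
--     if bal ==0:
--         return True
--     else:
--         return False
-- ===== SOURCE B (Python) =====
-- def check(s):
--     bal = 0
--     for c in s:
--         if c == '(':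
--             bal += 1
--         elif c == ')':
--             bal -= 1
--             if bal < 0:
--                 return False
--     return bal == 0
-- ===== Notes on version B (the rewrite author's own statement) =====
-- stated objective: simpler
-- what changed: B drops A's entire backward second pass (provably redundant given the forward never-negative check plus the final zero-balance test) and does one forward pass with an early exit on a negative balance.
import Mathlib
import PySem

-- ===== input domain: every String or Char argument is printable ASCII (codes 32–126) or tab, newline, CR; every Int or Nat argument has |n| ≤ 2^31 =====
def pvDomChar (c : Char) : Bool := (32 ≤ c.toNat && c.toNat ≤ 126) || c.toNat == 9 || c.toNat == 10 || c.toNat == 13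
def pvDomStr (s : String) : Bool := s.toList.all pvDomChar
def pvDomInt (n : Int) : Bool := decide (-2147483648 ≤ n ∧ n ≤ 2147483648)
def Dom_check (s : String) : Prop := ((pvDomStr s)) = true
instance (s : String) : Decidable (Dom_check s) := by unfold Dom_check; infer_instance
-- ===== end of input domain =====

-- B replaces A's two passes (forward + redundant backward) by one forward pass; objective: simpler.

-- ===== PORT A =====
-- first loop of A: update bal per char, return none (early False) when bal < 0
def checkLoop1 : List Char → Int → Option Int
  | [], bal => some bal
  | c :: rest, bal =>
    let bal := if c = '(' then bal + 1 else if c = ')' then bal - 1 else bal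
    if bal < 0 then none else checkLoop1 rest bal

-- second loop of A: iterates the characters in reverse, return none (early False) when bal > 0
def checkLoop2 : List Char → Int → Option Int
  | [], bal => some bal
  | c :: rest, bal =>
    let bal := if c = '(' then bal + 1 else if c = ')' then bal - 1 else bal
    if bal > 0 then none else checkLoop2 rest bal

def check (s : String) : Bool :=
  match checkLoop1 s.toList 0 with
  | none => false
  | some bal =>
    match checkLoop2 s.toList.reverse bal with
    | none => false
    | some bal => bal == 0

-- ===== PORT B =====
def altLoop : List Char → Int → Option Int
  | [], bal => some bal
  | c :: rest, bal =>
    if c = '(' then altLoop rest (bal + 1)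
    else if c = ')' then
      if bal - 1 < 0 then none else altLoop rest (bal - 1)
    else altLoop rest bal

def check_alt (s : String) : Bool :=
  match altLoop s.toList 0 with
  | none => false
  | some bal => bal == 0

-- ===== PRECONDITION & SPEC =====
def Spec_check (s : String) (out : Bool) : Prop := out = check_alt s
instance (s : String) (out : Bool) : Decidable (Spec_check s out) := by unfold Spec_check; infer_instance

-- ===== CLAIM (what is proved, stated in full; the proofs are below) =====
def Claim_equal_check : Prop := ∀ (s : String), Dom_check s → Spec_check s (check s)

-- ===== LEMMAS AND PROOFS =====

-- per-character balance delta, and its sum over a list (proof-only helper)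
def chDelta (c : Char) : Int := if c = '(' then 1 else if c = ')' then -1 else 0

def delta : List Char → Int
  | [] => 0
  | c :: rest => chDelta c + delta rest

theorem loop1_eq_altLoop (l : List Char) : ∀ b : Int, 0 ≤ b → checkLoop1 l b = altLoop l b := by
  induction l with
  | nil => intro b _; rfl
  | cons c rest ih =>
    intro b hb
    simp only [checkLoop1, altLoop]
    by_cases h1 : c = '('
    · simp only [h1, if_true]
      have : ¬ (b + 1 < 0) := by omega
      simp [this, ih (b+1) (by omega)]
    · by_cases h2 : c = ')'
      · simp only [h2]
        by_cases h3 : b - 1 < 0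
        · simp [h3]
        · simp [h3, ih (b-1) (by omega)]
      · have : ¬ (b < 0) := by omega
        simp [h1, h2, this, ih b hb]

theorem altLoop_nonneg (l : List Char) : ∀ b r : Int, 0 ≤ b → altLoop l b = some r → 0 ≤ r := by
  induction l with
  | nil => intro b r hb h; simp [altLoop] at h; omega
  | cons c rest ih =>
    intro b r hb h
    simp only [altLoop] at h
    by_cases h1 : c = '('
    · simp [h1] at h; exact ih _ _ (by omega) h
    · by_cases h2 : c = ')'
      · simp [h2] at h
        obtain ⟨h3, h⟩ := h
        exact ih _ _ (by omega) h
      · simp [h1, h2] at h; exact ih _ _ hb h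

theorem altLoop_delta (l : List Char) : ∀ b r : Int, altLoop l b = some r → r = b + delta l := by
  induction l with
  | nil => intro b r h; simp [altLoop] at h; simp [delta]; omega
  | cons c rest ih =>
    intro b r h
    simp only [altLoop] at h
    simp only [delta, chDelta]
    by_cases h1 : c = '('
    · simp [h1] at h ⊢; have := ih _ _ h; omega
    · by_cases h2 : c = ')'
      · simp [h2] at h ⊢
        obtain ⟨h3, h⟩ := h
        have := ih _ _ h; omega
      · simp [h1, h2] at h ⊢; have := ih _ _ h; omega

theorem delta_append (l m : List Char) : delta (l ++ m) = delta l + delta m := by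
  induction l with
  | nil => simp [delta]
  | cons c rest ih => simp [delta, ih]; ring

theorem delta_reverse (l : List Char) : delta l.reverse = delta l := by
  induction l with
  | nil => rfl
  | cons c rest ih => simp [List.reverse_cons, delta_append, delta, ih]; ring

theorem loop2_append (m m' : List Char) : ∀ b : Int,
    checkLoop2 (m ++ m') b = (checkLoop2 m b).bind (checkLoop2 m') := by
  induction m with
  | nil => intro b; rfl
  | cons c rest ih =>
    intro b
    simp only [List.cons_append, checkLoop2]
    by_cases h : (if c = '(' then b + 1 else if c = ')' then b - 1 else b) > 0
    · simp [h]
    · simp [h, ih]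

-- if the running balance ever ends positive, A's second loop + final test yields false
theorem loop2_pos_false (m : List Char) : ∀ b : Int, 0 < b + delta m →
    (match checkLoop2 m b with | none => false | some bal => bal == 0) = false := by
  induction m with
  | nil => intro b h; simp [delta] at h; simp [checkLoop2]; omega
  | cons c rest ih =>
    intro b h
    simp only [checkLoop2]
    by_cases hp : (if c = '(' then b + 1 else if c = ')' then b - 1 else b) > 0
    · simp [hp]
    · simp only [if_neg hp]
      apply ih
      simp only [delta, chDelta] at h
      by_cases h1 : c = '(' <;> by_cases h2 : c = ')' <;> simp [h1, h2] at h ⊢ <;> omega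

-- A's second loop succeeds on the reversal when B's loop succeeds and the totals stay ≤ 0
theorem loop2_reverse (l : List Char) : ∀ b r v : Int, 0 ≤ b → altLoop l b = some r →
    v + r ≤ 0 → checkLoop2 l.reverse v = some (v + (r - b)) := by
  induction l with
  | nil =>
    intro b r v _ h _
    simp [altLoop] at h
    simp [checkLoop2, List.reverse_nil]
    omega
  | cons c rest ih =>
    intro b r v hb h hvr
    simp only [altLoop] at h
    rw [List.reverse_cons, loop2_append]
    by_cases h1 : c = '('
    · simp [h1] at h
      rw [ih _ _ _ (by omega) h hvr]
      have hr := altLoop_nonneg rest (b+1) r (by omega) h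
      simp only [Option.bind_some, checkLoop2, h1]
      have : ¬ (v + (r - (b + 1)) + 1 > 0) := by omega
      simp [this]
      omega
    · by_cases h2 : c = ')'
      · simp [h2] at h
        obtain ⟨h3, h⟩ := h
        rw [ih _ _ _ (by omega) h hvr]
        simp only [Option.bind_some, checkLoop2, h2]
        simp
        omega
      · simp [h1, h2] at h
        rw [ih _ _ _ hb h hvr]
        simp only [Option.bind_some, checkLoop2, h1, h2]
        have : ¬ (v + (r - b) > 0) := by omega
        simp [this]

-- ===== VERDICT (by name: the statement is the Claim_ definition above) =====
theorem check_spec : Claim_equal_check := by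
  intro s _
  unfold Spec_check check check_alt
  rw [loop1_eq_altLoop s.toList 0 le_rfl]
  cases hA : altLoop s.toList 0 with
  | none => rfl
  | some r =>
    have hr0 : 0 ≤ r := altLoop_nonneg _ _ _ le_rfl hA
    by_cases hr : r = 0
    · subst hr
      simp only [loop2_reverse s.toList 0 0 0 le_rfl hA (by omega)]
      norm_num
    · have hd : delta s.toList = r := by have := altLoop_delta _ _ _ hA; omega
      have hpos : 0 < r + delta s.toList.reverse := by rw [delta_reverse, hd]; omega
      have := loop2_pos_false s.toList.reverse r hpos
      simp only [this]
      simp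
      omega
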